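-- pv_equiv track=rewrite | github.com/shree1892001/genfiller | Services/Voice.py | _find_best_option_match
-- ===== SOURCE A (Python) =====
-- def _find_best_option_match(target, options):
--     """Find the best matching option from available options"""
--     target = target.lower()
--
--     # Direct match
--     for option in options:
--         if option.lower() == target:
--             return option
--
--     # Partial match
--     for option in options:
--         if target in option.lower():
--             return option
--
--     # Handle special cases for counties
--     if 'county' in target:
--         county_name = target.replace('county', '').strip()
--         for option in options:
--             if county_name in option.lower():
--                 return option
--
--     return None
-- ===== SOURCE B (Python) =====
-- def _find_best_option_match(target, options):
--     """Find the best matching option from available options (single scoring pass)."""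
--     target = target.lower()
--     has_county = 'county' in target
--     county_name = target.replace('county', '').strip()
--
--     def score(option):
--         if option.lower() == target:
--             return 3
--         if target in option.lower():
--             return 2
--         if has_county and county_name in option.lower():
--             return 1
--         return 0
--
--     best_priority = 0
--     best_option = None
--     for option in options:
--         p = score(option)
--         if best_priority < p:
--             best_priority = p
--             best_option = option
--     return best_option if best_priority > 0 else None
-- ===== Notes on version B (the rewrite author's own statement) =====
-- stated objective: alternative
-- what changed: A's three sequential early-return scans (exact, then partial, then county-name) are replaced by a single pass that scores each option (3/2/1) and keeps the earliest option with the strictly highest score.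
import Mathlib
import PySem

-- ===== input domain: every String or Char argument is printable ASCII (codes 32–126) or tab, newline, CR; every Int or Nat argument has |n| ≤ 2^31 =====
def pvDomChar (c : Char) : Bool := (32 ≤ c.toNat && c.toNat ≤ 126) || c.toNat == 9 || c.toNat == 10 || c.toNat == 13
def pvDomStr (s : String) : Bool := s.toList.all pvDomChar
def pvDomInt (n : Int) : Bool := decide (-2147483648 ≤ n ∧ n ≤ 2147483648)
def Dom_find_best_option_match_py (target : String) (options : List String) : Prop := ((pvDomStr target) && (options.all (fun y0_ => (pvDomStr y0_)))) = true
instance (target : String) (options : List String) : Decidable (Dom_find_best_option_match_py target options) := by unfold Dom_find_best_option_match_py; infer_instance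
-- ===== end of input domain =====

-- B replaces A's three sequential scans by ONE pass that scores each option (3 exact / 2 partial /
-- 1 county-name match) and keeps the earliest option with the strictly highest score; alternative
-- decomposition, same result.

-- ===== PORT A =====
-- the three early-return loops of A, one helper each
def pvAExact (t : String) : List String → Option String
  | [] => none
  | o :: rest => if PySem.Str.lower o = t then some o else pvAExact t rest

def pvAPartial (t : String) : List String → Option String
  | [] => none
  | o :: rest => if PySem.Str.isIn t (PySem.Str.lower o) then some o else pvAPartial t rest

def pvACounty (cn : String) : List String → Option String
  | [] => none
  | o :: rest => if PySem.Str.isIn cn (PySem.Str.lower o) then some o else pvACounty cn rest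

def find_best_option_match_py (target : String) (options : List String) : Option String :=
  match pvAExact (PySem.Str.lower target) options with
  | some o => some o
  | none =>
    match pvAPartial (PySem.Str.lower target) options with
    | some o => some o
    | none =>
      if PySem.Str.isIn "county" (PySem.Str.lower target) then
        pvACounty (PySem.Str.strip (PySem.Str.replace (PySem.Str.lower target) "county" "")) options
      else
        none

-- ===== PORT B =====
-- B's inner 'score' function
def pvScore (t : String) (hasCounty : Bool) (cn : String) (o : String) : Nat :=
  if PySem.Str.lower o = t then 3
  else if PySem.Str.isIn t (PySem.Str.lower o) then 2
  else if hasCounty && PySem.Str.isIn cn (PySem.Str.lower o) then 1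
  else 0

-- B's loop: fold carrying (best_priority, best_option)
def pvBestFold (t : String) (hasCounty : Bool) (cn : String) (options : List String) :
    Nat × Option String :=
  options.foldl
    (fun (acc : Nat × Option String) o =>
      if acc.1 < pvScore t hasCounty cn o then (pvScore t hasCounty cn o, some o) else acc)
    (0, none)

def find_best_option_match_py_alt (target : String) (options : List String) : Option String :=
  if 0 < (pvBestFold (PySem.Str.lower target)
            (PySem.Str.isIn "county" (PySem.Str.lower target))
            (PySem.Str.strip (PySem.Str.replace (PySem.Str.lower target) "county" ""))
            options).1
  then (pvBestFold (PySem.Str.lower target)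
          (PySem.Str.isIn "county" (PySem.Str.lower target))
          (PySem.Str.strip (PySem.Str.replace (PySem.Str.lower target) "county" ""))
          options).2
  else none

-- ===== PRECONDITION & SPEC =====
def Spec_find_best_option_match_py (target : String) (options : List String) (out : Option String) : Prop := out = find_best_option_match_py_alt target options
instance (target : String) (options : List String) (out : Option String) : Decidable (Spec_find_best_option_match_py target options out) := by unfold Spec_find_best_option_match_py; infer_instance

-- ===== CLAIM (what is proved, stated in full; the proofs are below) =====
def Claim_equal_find_best_option_match_py : Prop := ∀ (target : String) (options : List String), Dom_find_best_option_match_py target options → Spec_find_best_option_match_py target options (find_best_option_match_py target options)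

-- ===== LEMMAS AND PROOFS =====

-- running maximum of the scores, seeded with p (the first component of B's fold)
def pvM (t : String) (hc : Bool) (cn : String) (l : List String) (p : Nat) : Nat :=
  l.foldl (fun a o => max a (pvScore t hc cn o)) p

lemma pvScore_le_three (t : String) (hc : Bool) (cn o : String) : pvScore t hc cn o ≤ 3 := by
  unfold pvScore; split_ifs <;> omega

lemma le_pvM (t : String) (hc : Bool) (cn : String) (l : List String) (p : Nat) :
    p ≤ pvM t hc cn l p := by
  induction l generalizing p with
  | nil => simp [pvM]
  | cons o rest ih =>
      have := ih (max p (pvScore t hc cn o))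
      simp only [pvM, List.foldl_cons] at *
      omega

lemma pvM_le (t : String) (hc : Bool) (cn : String) (l : List String) (p c : Nat)
    (hp : p ≤ c) (h : ∀ o ∈ l, pvScore t hc cn o ≤ c) : pvM t hc cn l p ≤ c := by
  induction l generalizing p with
  | nil => simpa [pvM]
  | cons o rest ih =>
      simp only [pvM, List.foldl_cons]
      exact ih (max p (pvScore t hc cn o))
        (by have := h o (by simp); omega) (fun x hx => h x (by simp [hx]))

lemma score_le_pvM (t : String) (hc : Bool) (cn : String) (l : List String) (p : Nat)
    (o : String) (ho : o ∈ l) : pvScore t hc cn o ≤ pvM t hc cn l p := by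
  induction l generalizing p with
  | nil => cases ho
  | cons x rest ih =>
      simp only [pvM, List.foldl_cons]
      rcases List.mem_cons.mp ho with rfl | h
      · have := le_pvM t hc cn rest (max p (pvScore t hc cn o)); simp only [pvM] at this; omega
      · exact ih _ h

lemma find?_congr_mem {l : List String} {p q : String → Bool}
    (h : ∀ x ∈ l, p x = q x) : l.find? p = l.find? q := by
  induction l with
  | nil => rfl
  | cons o rest ih =>
      simp only [List.find?]
      rw [h o (by simp)]
      cases q o
      · exact ih (fun x hx => h x (by simp [hx]))
      · rfl

-- B's fold computes the running maximum together with the FIRST option achieving it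
lemma foldScore_char (t : String) (hc : Bool) (cn : String) (l : List String) (p : Nat)
    (b : Option String) :
    l.foldl (fun (acc : Nat × Option String) o =>
        if acc.1 < pvScore t hc cn o then (pvScore t hc cn o, some o) else acc) (p, b)
      = (pvM t hc cn l p,
         if pvM t hc cn l p = p then b
         else l.find? (fun o => pvScore t hc cn o == pvM t hc cn l p)) := by
  induction l generalizing p b with
  | nil => simp [pvM]
  | cons o rest ih =>
      simp only [List.foldl_cons, List.find?]
      have hM : pvM t hc cn (o :: rest) p = pvM t hc cn rest (max p (pvScore t hc cn o)) := by
        simp [pvM]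
      rw [hM]
      by_cases h : p < pvScore t hc cn o
      · simp only [if_pos h]
        rw [ih]
        have hmax : max p (pvScore t hc cn o) = pvScore t hc cn o := by omega
        rw [hmax]
        have hle := le_pvM t hc cn rest (pvScore t hc cn o)
        by_cases he : pvM t hc cn rest (pvScore t hc cn o) = pvScore t hc cn o
        · rw [he]
          simp [show pvScore t hc cn o ≠ p by omega]
        · have hb : (pvScore t hc cn o == pvM t hc cn rest (pvScore t hc cn o)) = false := by
            simp [Ne.symm he]
          simp [he, hb, show pvM t hc cn rest (pvScore t hc cn o) ≠ p by omega]
      · simp only [if_neg h]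
        rw [ih]
        have hmax : max p (pvScore t hc cn o) = p := by omega
        rw [hmax]
        have hlt := le_pvM t hc cn rest p
        by_cases he : pvM t hc cn rest p = p
        · simp [he]
        · have hb : (pvScore t hc cn o == pvM t hc cn rest p) = false := by
            simp; omega
          simp [he, hb]

lemma pvBestFold_char (t : String) (hc : Bool) (cn : String) (l : List String) :
    pvBestFold t hc cn l
      = (pvM t hc cn l 0,
         if pvM t hc cn l 0 = 0 then none
         else l.find? (fun o => pvScore t hc cn o == pvM t hc cn l 0)) := by
  unfold pvBestFold
  exact foldScore_char t hc cn l 0 none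

-- A's loops are find? with the corresponding predicate
lemma pvAExact_eq (t : String) (l : List String) :
    pvAExact t l = l.find? (fun o => decide (PySem.Str.lower o = t)) := by
  induction l with
  | nil => rfl
  | cons o rest ih => simp only [pvAExact, List.find?]; split_ifs with h <;> simp_all

lemma pvAPartial_eq (t : String) (l : List String) :
    pvAPartial t l = l.find? (fun o => PySem.Str.isIn t (PySem.Str.lower o)) := by
  induction l with
  | nil => rfl
  | cons o rest ih =>
      simp only [pvAPartial, List.find?]
      split_ifs with h <;> simp_all

lemma pvACounty_eq (cn : String) (l : List String) :
    pvACounty cn l = l.find? (fun o => PySem.Str.isIn cn (PySem.Str.lower o)) := by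
  induction l with
  | nil => rfl
  | cons o rest ih =>
      simp only [pvACounty, List.find?]
      split_ifs with h <;> simp_all

-- exact match implies substring match (Python: t == o.lower() ⇒ t in o.lower())
lemma pv_main (t cn : String) (hc : Bool) (options : List String) :
    (match pvAExact t options with
     | some o => some o
     | none =>
       match pvAPartial t options with
       | some o => some o
       | none => if hc then pvACounty cn options else none)
    = (if 0 < (pvBestFold t hc cn options).1 then (pvBestFold t hc cn options).2 else none) := by
  rw [pvBestFold_char]
  rcases hE : pvAExact t options with _ | x
  · -- no exact match
    have hnE : ∀ o ∈ options, ¬ (PySem.Str.lower o = t) := by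
      intro o ho
      rw [pvAExact_eq] at hE
      have := List.find?_eq_none.mp hE o ho
      simpa using this
    rcases hP : pvAPartial t options with _ | x
    · -- no partial match either
      have hnP : ∀ o ∈ options, PySem.Str.isIn t (PySem.Str.lower o) = false := by
        intro o ho
        rw [pvAPartial_eq] at hP
        have := List.find?_eq_none.mp hP o ho
        simpa using this
      cases hc with
      | false =>
          have hM0 : pvM t false cn options 0 = 0 :=
            Nat.le_antisymm
              (pvM_le t false cn options 0 0 le_rfl (fun o ho => by
                unfold pvScore
                rw [if_neg (hnE o ho), hnP o ho]
                simp))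
              (le_pvM t false cn options 0)
          rw [hM0]
          simp
      | true =>
          rcases hC : pvACounty cn options with _ | x
          · -- no county match: every score is 0
            have hnC : ∀ o ∈ options, PySem.Str.isIn cn (PySem.Str.lower o) = false := by
              intro o ho
              rw [pvACounty_eq] at hC
              have := List.find?_eq_none.mp hC o ho
              simpa using this
            have hM0 : pvM t true cn options 0 = 0 :=
              Nat.le_antisymm
                (pvM_le t true cn options 0 0 le_rfl (fun o ho => by
                  unfold pvScore
                  rw [if_neg (hnE o ho), hnP o ho, hnC o ho]
                  simp))
                (le_pvM t true cn options 0)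
            rw [hM0]
            simp
          · -- county match found: the highest score is 1
            rw [pvACounty_eq] at hC
            have hx := List.find?_some hC
            have hxm := List.mem_of_find?_eq_some hC
            have hsx : pvScore t true cn x = 1 := by
              unfold pvScore
              rw [if_neg (hnE x hxm), hnP x hxm, hx]
              simp
            have hle1 : ∀ o ∈ options, pvScore t true cn o ≤ 1 := by
              intro o ho
              unfold pvScore
              rw [if_neg (hnE o ho), hnP o ho]
              split_ifs <;> simp_all
            have hM1 : pvM t true cn options 0 = 1 :=
              Nat.le_antisymm (pvM_le t true cn options 0 1 (by omega) hle1)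
                (by have := score_le_pvM t true cn options 0 x hxm; omega)
            have hfind : (options.find? (fun o => pvScore t true cn o == pvM t true cn options 0))
                = options.find? (fun o => PySem.Str.isIn cn (PySem.Str.lower o)) := by
              apply find?_congr_mem
              intro o ho
              rw [hM1]
              unfold pvScore
              rw [if_neg (hnE o ho), hnP o ho]
              cases hc2 : PySem.Str.isIn cn (PySem.Str.lower o) <;> simp
            rw [hM1] at hfind ⊢
            rw [hfind, hC]
            simp
    · -- first partial match x: the highest score is 2
      rw [pvAPartial_eq] at hP
      have hx := List.find?_some hP
      have hxm := List.mem_of_find?_eq_some hP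
      have hsx : pvScore t hc cn x = 2 := by
        unfold pvScore
        rw [if_neg (hnE x hxm), hx]
        simp
      have hle2 : ∀ o ∈ options, pvScore t hc cn o ≤ 2 := by
        intro o ho
        unfold pvScore
        split_ifs with h1 h2 h3 <;> first | exact absurd h1 (hnE o ho) | omega
      have hM2 : pvM t hc cn options 0 = 2 :=
        Nat.le_antisymm (pvM_le t hc cn options 0 2 (by omega) hle2)
          (by have := score_le_pvM t hc cn options 0 x hxm; omega)
      have hfind : (options.find? (fun o => pvScore t hc cn o == pvM t hc cn options 0))
          = options.find? (fun o => PySem.Str.isIn t (PySem.Str.lower o)) := by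
        apply find?_congr_mem
        intro o ho
        rw [hM2]
        unfold pvScore
        rw [if_neg (hnE o ho)]
        cases hp2 : PySem.Str.isIn t (PySem.Str.lower o)
        · split_ifs <;> simp_all
        · rfl
      rw [hM2] at hfind ⊢
      rw [hfind, hP]
      simp
  · -- exact match found: the highest score is 3
    rw [pvAExact_eq] at hE
    have hx : PySem.Str.lower x = t := by have := List.find?_some hE; simpa using this
    have hxm := List.mem_of_find?_eq_some hE
    have hsx : pvScore t hc cn x = 3 := by
      unfold pvScore
      rw [if_pos hx]
    have hM3 : pvM t hc cn options 0 = 3 :=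
      Nat.le_antisymm (pvM_le t hc cn options 0 3 (by omega) (fun o _ => pvScore_le_three t hc cn o))
        (by have := score_le_pvM t hc cn options 0 x hxm; omega)
    have hfind : (options.find? (fun o => pvScore t hc cn o == pvM t hc cn options 0))
        = options.find? (fun o => decide (PySem.Str.lower o = t)) := by
      apply find?_congr_mem
      intro o _
      rw [hM3]
      unfold pvScore
      by_cases h1 : PySem.Str.lower o = t
      · rw [if_pos h1]
        simp [h1]
      · rw [if_neg h1]
        split_ifs <;> simp [h1]
    rw [hM3] at hfind ⊢
    rw [hfind]
    simp [hE]

-- ===== VERDICT (by name: the statement is the Claim_ definition above) =====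
theorem find_best_option_match_py_spec : Claim_equal_find_best_option_match_py := by
  intro target options _
  unfold Spec_find_best_option_match_py find_best_option_match_py find_best_option_match_py_alt
  exact pv_main (PySem.Str.lower target)
    (PySem.Str.strip (PySem.Str.replace (PySem.Str.lower target) "county" ""))
    (PySem.Str.isIn "county" (PySem.Str.lower target)) options
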